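-- pv_equiv track=rewrite | github.com/ASSERT-KTH/Mokav | experiments/pynguin/c4b/return-lst/generated_tests/src_2263/2/src_2263.py | func
-- ===== SOURCE A (Python) =====
-- def func(*args):
-- 	ret_values = []
--
-- 	username = args[0]
-- 	num = 0
-- 	for i in range(len(username)):
-- 	    for a in range(0, i):
-- 	        if (username[i] == username[a]):
-- 	            num -= 1
-- 	            break
-- 	    num += 1
-- 	if ((num % 2) == 0):
-- 	    ret_values.append('CHAT WITH HER!')
-- 	else:
-- 	    ret_values.append('IGNORE HIM!')
--
-- 	return ret_values
-- ===== SOURCE B (Python) =====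
-- def func(*args):
--     username = args[0]
--     if len(set(username)) % 2 == 0:
--         return ['CHAT WITH HER!']
--     return ['IGNORE HIM!']
-- ===== Notes on version B (the rewrite author's own statement) =====
-- stated objective: faster
-- what changed: Replaces the nested O(n^2) backward duplicate scan counting first occurrences with a single hash-set construction (len(set(username))), branching on its parity.
import Mathlib
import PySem

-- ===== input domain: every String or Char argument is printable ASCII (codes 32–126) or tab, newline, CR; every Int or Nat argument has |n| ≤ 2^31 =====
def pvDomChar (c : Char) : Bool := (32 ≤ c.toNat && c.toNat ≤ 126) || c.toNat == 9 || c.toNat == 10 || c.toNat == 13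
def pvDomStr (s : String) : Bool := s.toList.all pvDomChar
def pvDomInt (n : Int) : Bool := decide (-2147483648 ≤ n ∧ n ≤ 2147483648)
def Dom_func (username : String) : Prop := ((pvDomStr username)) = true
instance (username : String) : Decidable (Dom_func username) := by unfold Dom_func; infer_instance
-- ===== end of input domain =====

-- B replaces A's nested O(n^2) backward duplicate scan with a single set construction; parity branch unchanged.

-- ===== PORT A =====
-- inner 'for a in range(0, i): if username[i] == username[a]: num -= 1; break'
def funcInner (cs : List Char) (ci : Char) : List Int → Int → Int
  | [], num => num
  | a :: rest, num =>
      if PySem.List.pyGetD cs a ' ' == ci then num - 1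
      else funcInner cs ci rest num

def func (username : String) : List String :=
  let cs := username.toList
  -- indices i in range(len(username)) are in range, so pyGetD's default is never read
  let num : Int := (PySem.List.pyRange 0 (cs.length : Int) 1).foldl
    (fun num i =>
      funcInner cs (PySem.List.pyGetD cs i ' ') (PySem.List.pyRange 0 i 1) num + 1) 0
  if PySem.Int.mod num 2 == 0 then ["CHAT WITH HER!"] else ["IGNORE HIM!"]

-- ===== PORT B =====
def func_alt (username : String) : List String :=
  if (PySem.Set.ofList username.toList).length % 2 == 0 then ["CHAT WITH HER!"]
  else ["IGNORE HIM!"]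

-- ===== PRECONDITION & SPEC =====
def Spec_func (username : String) (out : List String) : Prop := out = func_alt username
instance (username : String) (out : List String) : Decidable (Spec_func username out) := by unfold Spec_func; infer_instance

-- ===== CLAIM (what is proved, stated in full; the proofs are below) =====
def Claim_equal_func : Prop := ∀ (username : String), Dom_func username → Spec_func username (func username)

-- ===== LEMMAS AND PROOFS =====

-- the break only depends on whether some index in the list matches
theorem funcInner_eq (cs : List Char) (ci : Char) (l : List Int) (num : Int) :
    funcInner cs ci l num =
      if l.any (fun a => PySem.List.pyGetD cs a ' ' == ci) then num - 1 else num := by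
  induction l with
  | nil => simp [funcInner]
  | cons a rest ih =>
      simp only [funcInner, List.any_cons]
      by_cases h : PySem.List.pyGetD cs a ' ' == ci
      · simp [h]
      · simp [h, ih]

theorem any_range_eq_contains_take (cs : List Char) (c : Char) :
    ∀ n : Nat, n ≤ cs.length →
      ((List.range n).any (fun k => cs.getD k ' ' == c)) = (cs.take n).contains c := by
  intro n
  induction n with
  | zero => simp
  | succ m ih =>
      intro h
      have hm : m < cs.length := by omega
      rw [List.range_succ, List.any_append, ih (by omega)]
      have htake : cs.take (m+1) = cs.take m ++ [cs[m]] := by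
        rw [List.take_add_one]
        simp [List.getElem?_eq_getElem hm]
      rw [htake]
      simp only [List.any_cons, List.any_nil, Bool.or_false,
        List.getD_eq_getElem cs ' ' hm]
      by_cases h1 : c ∈ cs.take m
      · have hmem : c ∈ cs.take (m+1) := htake ▸ List.mem_append_left _ h1
        simp [h1, hmem]
      · by_cases h2 : c = cs[m]
        · have hmem : cs[m] ∈ cs.take (m+1) := htake ▸ List.mem_append_right _ (by simp)
          simp [h2, hmem]
        · have hnotin : c ∉ cs.take (m+1) := fun hx =>
            (List.mem_append.mp (htake ▸ hx)).elim h1 (fun a => h2 (by simpa using a))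
          simp [hnotin, Ne.symm h2, h1]

theorem loop_eq (cs : List Char) : ∀ n : Nat, n ≤ cs.length →
    (PySem.List.pyRange 0 (n : Int) 1).foldl
      (fun num i =>
        funcInner cs (PySem.List.pyGetD cs i ' ') (PySem.List.pyRange 0 i 1) num + 1) 0
      = ((PySem.Set.ofList (cs.take n)).length : Int) := by
  intro n
  induction n with
  | zero => simp [PySem.Set.ofList]
  | succ m ih =>
      intro h
      have hm : m < cs.length := by omega
      have hcast : ((m + 1 : Nat) : Int) = (m : Int) + 1 := by push_cast; ring
      rw [hcast, PySem.List.pyRange_one_succ_right (by positivity), List.foldl_append,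
          ih (by omega)]
      simp only [List.foldl_cons, List.foldl_nil]
      rw [funcInner_eq]
      -- evaluate the membership test over range(0, m)
      have hany : ((PySem.List.pyRange 0 (m : Int) 1).any
          (fun a => PySem.List.pyGetD cs a ' ' == PySem.List.pyGetD cs (m : Int) ' '))
          = (cs.take m).contains cs[m] := by
        rw [PySem.List.pyRange_one]
        simp only [zero_add, Int.sub_zero, Int.toNat_natCast, List.any_map,
          Function.comp_def, PySem.List.pyGetD_natCast]
        rw [any_range_eq_contains_take cs _ m (by omega)]
        congr 1
        exact List.getD_eq_getElem cs ' ' hm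
      rw [hany]
      -- relate to Set.add on the B side
      have htake : cs.take (m+1) = cs.take m ++ [cs[m]] := by
        rw [List.take_add_one]
        simp [List.getElem?_eq_getElem hm]
      rw [htake]
      have hofl : PySem.Set.ofList (cs.take m ++ [cs[m]]) =
          PySem.Set.add (PySem.Set.ofList (cs.take m)) cs[m] := by
        rw [PySem.Set.ofList_eq_foldl, PySem.Set.ofList_eq_foldl, List.foldl_append]
        rfl
      rw [hofl]
      by_cases hc : (cs.take m).contains cs[m]
      · have hmem : cs[m] ∈ PySem.Set.ofList (cs.take m) := by
          rw [PySem.Set.mem_ofList]; exact List.contains_iff_mem.mp hc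
        have : PySem.Set.add (PySem.Set.ofList (cs.take m)) cs[m] =
            PySem.Set.ofList (cs.take m) := by
          simp [PySem.Set.add, PySem.Set.contains, hmem]
        rw [this]
        have hmem' : cs[m] ∈ cs.take m := List.contains_iff_mem.mp hc
        simp [hmem']
      · have hmem : cs[m] ∉ PySem.Set.ofList (cs.take m) := by
          rw [PySem.Set.mem_ofList]
          intro hx; exact hc (List.contains_iff_mem.mpr hx)
        have : PySem.Set.add (PySem.Set.ofList (cs.take m)) cs[m] =
            PySem.Set.ofList (cs.take m) ++ [cs[m]] := by
          simp [PySem.Set.add, PySem.Set.contains, hmem]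
        rw [this]
        have hmem' : cs[m] ∉ cs.take m := fun hx => hc (List.contains_iff_mem.mpr hx)
        simp [hmem', List.length_append]

-- ===== VERDICT (by name: the statement is the Claim_ definition above) =====
theorem func_spec : Claim_equal_func := by
  intro username _
  unfold Spec_func func func_alt
  simp only []
  rw [loop_eq username.toList username.toList.length (by omega), List.take_length]
  set k := (PySem.Set.ofList username.toList).length with hk
  have hmod : PySem.Int.mod (k : Int) 2 = ((k % 2 : Nat) : Int) := by
    exact_mod_cast PySem.Int.mod_natCast k 2
  rw [hmod]
  by_cases h : k % 2 = 0
  · simp [h]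
  · have h2 : k % 2 = 1 := by omega
    simp [h2]
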